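-- pv_equiv track=rewrite | github.com/SeeYounsunny/SanS_AI_Book_Club | app/telegram_app.py | _build_weekly_page_ranges
-- ===== SOURCE A (Python) =====
-- from typing import List, Optional, Tuple
--
-- def _build_weekly_page_ranges(total_pages: int) -> List[Tuple[int, int]]:
--     base = total_pages // 4
--     remainder = total_pages % 4
--     ranges: List[Tuple[int, int]] = []
--     current = 1
--     for idx in range(4):
--         size = base + (1 if idx < remainder else 0)
--         end = current + size - 1
--         ranges.append((current, max(current, end)))
--         current = end + 1
--     return ranges
-- ===== SOURCE B (Python) =====
-- from typing import List, Tuple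
--
-- def _build_weekly_page_ranges(total_pages: int) -> List[Tuple[int, int]]:
--     base = total_pages // 4
--     remainder = total_pages % 4
--     return [
--         (1 + i * base + min(i, remainder),
--          max(1 + i * base + min(i, remainder),
--              i * base + min(i, remainder) + base + (1 if i < remainder else 0)))
--         for i in range(4)
--     ]
-- ===== Notes on version B (the rewrite author's own statement) =====
-- stated objective: alternative
-- what changed: Replaced the accumulator-threaded cursor loop by a closed-form comprehension computing each week's start as 1 + i*base + min(i, remainder) directly.
import Mathlib
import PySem

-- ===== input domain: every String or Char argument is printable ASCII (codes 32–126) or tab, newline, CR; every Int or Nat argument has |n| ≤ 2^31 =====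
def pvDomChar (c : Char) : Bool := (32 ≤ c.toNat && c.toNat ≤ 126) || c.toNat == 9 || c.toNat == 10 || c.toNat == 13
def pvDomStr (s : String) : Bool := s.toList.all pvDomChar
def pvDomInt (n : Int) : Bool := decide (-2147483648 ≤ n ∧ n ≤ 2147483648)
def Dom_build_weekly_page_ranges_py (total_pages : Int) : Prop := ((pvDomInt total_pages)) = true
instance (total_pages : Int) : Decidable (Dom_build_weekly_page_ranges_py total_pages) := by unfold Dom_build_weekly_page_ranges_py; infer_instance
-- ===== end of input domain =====

-- B replaces A's running-cursor loop by a closed-form per-week formula (alternative decomposition, same cost).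


-- ===== PORT A =====
-- Transliteration of A: cursor-threading loop over range(4).
def build_weekly_page_ranges_py (total_pages : Int) : List (Int × Int) :=
  let base := PySem.Int.floordiv total_pages 4
  let remainder := PySem.Int.mod total_pages 4
  let st := (PySem.List.pyRange 0 4 1).foldl
    (fun (st : List (Int × Int) × Int) idx =>
      let size := base + (if idx < remainder then 1 else 0)
      let endd := st.2 + size - 1
      (st.1 ++ [(st.2, max st.2 endd)], endd + 1))
    ([], 1)
  st.1

-- ===== PORT B =====
-- Transliteration of B: closed-form start per week, no running cursor.
def build_weekly_page_ranges_py_alt (total_pages : Int) : List (Int × Int) :=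
  let base := PySem.Int.floordiv total_pages 4
  let remainder := PySem.Int.mod total_pages 4
  (PySem.List.pyRange 0 4 1).map (fun i =>
    (1 + i * base + min i remainder,
     max (1 + i * base + min i remainder)
         (i * base + min i remainder + base + (if i < remainder then 1 else 0))))

-- ===== PRECONDITION & SPEC =====
def Spec_build_weekly_page_ranges_py (total_pages : Int) (out : List (Int × Int)) : Prop := out = build_weekly_page_ranges_py_alt total_pages
instance (total_pages : Int) (out : List (Int × Int)) : Decidable (Spec_build_weekly_page_ranges_py total_pages out) := by unfold Spec_build_weekly_page_ranges_py; infer_instance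

-- ===== CLAIM (what is proved, stated in full; the proofs are below) =====
def Claim_equal_build_weekly_page_ranges_py : Prop := ∀ (total_pages : Int), Dom_build_weekly_page_ranges_py total_pages → Spec_build_weekly_page_ranges_py total_pages (build_weekly_page_ranges_py total_pages)

-- ===== LEMMAS AND PROOFS =====

-- ===== VERDICT (by name: the statement is the Claim_ definition above) =====
theorem build_weekly_page_ranges_py_spec : Claim_equal_build_weekly_page_ranges_py := by
  intro t _
  unfold Spec_build_weekly_page_ranges_py
  unfold build_weekly_page_ranges_py build_weekly_page_ranges_py_alt
  have hr4 : PySem.List.pyRange 0 4 1 = [0, 1, 2, 3] := by decide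
  rw [hr4]
  rw [PySem.Int.floordiv_eq_ediv_of_pos (by norm_num), PySem.Int.mod_eq_emod_of_pos (by norm_num)]
  have hb : 0 ≤ t % 4 ∧ t % 4 < 4 := ⟨Int.emod_nonneg t (by norm_num), Int.emod_lt_of_pos t (by norm_num)⟩
  simp only [List.foldl, List.map, List.nil_append, List.cons_append,
    List.cons.injEq, Prod.mk.injEq, and_true]
  split_ifs <;> omega
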